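-- pv_equiv track=rewrite | github.com/MarkSon-42/Team_ALGO | hyungjoon/프로그래머스/레벨 2/230718_프로그래머스_150369_택배 배달과 수거하기/failed.py | solution
-- ===== SOURCE A (Python) =====
-- def solution(cap, n, deliveries, pickups):
--     answer = 0
--     # 0. n = 100,000 이라 완탐은 안됨, 그리디 문제
--     # 1. 일단, 한번에 멀리 나가야 동선이 최적화 되므로, 먼곳부터 탐색하도록 한다.
--     for i in range(n-1, -1, -1):
--         # 배달항목과 수거항목
--         d, p = deliveries[i], pickups[i]
--         # 2. 해당 집을 비우는데 드는 resource는 d+p임. 따라서 d+p가 cap보다 크다면 두번 와야되니까 거리를 *2 해주고, 아니라면 한번만 거리에 더해준다.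
--         if d+p > cap:
--             answer += (i+1)*2
--         else:
--             answer += (i+1)
--
--     return answer
-- ===== SOURCE B (Python) =====
-- def solution(cap, n, deliveries, pickups):
--     # Road-segment view: the leg ending at house k is crossed once per trip that
--     # reaches house k or beyond, so sweep from the farthest house inward keeping
--     # a running count of trips and add that count for each segment.
--     m = max(n, 0)
--     trips = 0
--     answer = 0
--     for d, p in zip(reversed(deliveries[:m]), reversed(pickups[:m])):
--         trips += 2 if d + p > cap else 1
--         answer += trips
--     return answer
-- ===== Notes on version B (the rewrite author's own statement) =====
-- stated objective: alternative
-- what changed: B recasts distance-per-house as trips-per-road-segment: it zips the two arrays, sweeps from the farthest house inward maintaining a running trip counter, and adds that counter once per segment, eliminating A's index arithmetic (i+1) and the doubling branch entirely.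
import Mathlib
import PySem

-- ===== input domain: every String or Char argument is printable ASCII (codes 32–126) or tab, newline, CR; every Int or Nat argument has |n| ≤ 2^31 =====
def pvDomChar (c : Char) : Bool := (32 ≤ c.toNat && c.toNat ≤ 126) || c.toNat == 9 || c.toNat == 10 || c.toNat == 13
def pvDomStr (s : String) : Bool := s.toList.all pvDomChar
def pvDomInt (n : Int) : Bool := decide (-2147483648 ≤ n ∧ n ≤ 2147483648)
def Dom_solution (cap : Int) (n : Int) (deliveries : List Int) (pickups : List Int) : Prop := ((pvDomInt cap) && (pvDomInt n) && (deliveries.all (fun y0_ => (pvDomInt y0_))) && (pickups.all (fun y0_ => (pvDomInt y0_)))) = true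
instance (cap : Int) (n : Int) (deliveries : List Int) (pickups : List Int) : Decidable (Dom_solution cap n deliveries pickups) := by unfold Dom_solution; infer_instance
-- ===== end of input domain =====

-- B recasts A's per-house sum of (i+1)·(1 or 2) as trips per road segment: it sweeps the
-- zipped arrays from the farthest house inward with a running trip counter added once per
-- segment, removing all index arithmetic (objective: alternative).

-- ===== PORT A =====
def solution (cap : Int) (n : Int) (deliveries : List Int) (pickups : List Int) : Int :=
  (PySem.List.pyRange (n - 1) (-1) (-1)).foldl
    (fun answer i =>
      let d := PySem.List.pyGetD deliveries i 0
      let p := PySem.List.pyGetD pickups i 0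
      if d + p > cap then answer + (i + 1) * 2 else answer + (i + 1)) 0

-- ===== PORT B =====
def solution_alt (cap : Int) (n : Int) (deliveries : List Int) (pickups : List Int) : Int :=
  let m := max n 0
  let st := ((PySem.List.slice deliveries none (some m)).reverse.zip
             (PySem.List.slice pickups none (some m)).reverse).foldl
      (fun (st : Int × Int) dp =>
        let trips := st.1 + (if dp.1 + dp.2 > cap then 2 else 1)
        (trips, st.2 + trips)) (0, 0)
  st.2

-- ===== PRECONDITION & SPEC =====
-- Pre_ excludes only the inputs where A raises IndexError: positive n larger than a list's length.
def Pre_solution (cap : Int) (n : Int) (deliveries : List Int) (pickups : List Int) : Prop :=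
  n ≤ deliveries.length ∧ n ≤ pickups.length
instance (cap : Int) (n : Int) (deliveries : List Int) (pickups : List Int) : Decidable (Pre_solution cap n deliveries pickups) := by unfold Pre_solution; infer_instance
def pvWitness_solution : Int × Int × List Int × List Int := (4, 3, [1, 2, 5], [0, 3, 0])

def Spec_solution (cap : Int) (n : Int) (deliveries : List Int) (pickups : List Int) (out : Int) : Prop := out = solution_alt cap n deliveries pickups
instance (cap : Int) (n : Int) (deliveries : List Int) (pickups : List Int) (out : Int) : Decidable (Spec_solution cap n deliveries pickups out) := by unfold Spec_solution; infer_instance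

-- ===== CLAIM (what is proved, stated in full; the proofs are below) =====
def Claim_equal_solution : Prop := ∀ (cap : Int) (n : Int) (deliveries : List Int) (pickups : List Int), Dom_solution cap n deliveries pickups → Pre_solution cap n deliveries pickups → Spec_solution cap n deliveries pickups (solution cap n deliveries pickups)

-- ===== LEMMAS AND PROOFS =====

-- weighted position sum Σ (i+1)·ws[i], written head-recursively
def pvWt : List Int → Int
  | [] => 0
  | w :: ws => w + ws.sum + pvWt ws

theorem pvWt_snoc (ws : List Int) (w : Int) :
    pvWt (ws ++ [w]) = pvWt ws + ((ws.length : Int) + 1) * w := by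
  induction ws with
  | nil => simp [pvWt]
  | cons a t ih => simp [pvWt, ih]; ring

-- zip commutes with reverse when the lengths agree
theorem pv_zip_reverse {α β : Type} : ∀ (a : List α) (b : List β), a.length = b.length →
    a.reverse.zip b.reverse = (a.zip b).reverse := by
  intro a
  induction a with
  | nil => intro b h; simp [(List.length_eq_zero_iff).mp h.symm]
  | cons x as ih =>
      intro b h
      cases b with
      | nil => simp at h
      | cons y bs =>
          have h' : as.length = bs.length := by simpa using h
          simp only [List.reverse_cons, List.zip_cons_cons]
          rw [List.zip_append (by simpa using h'), ih bs h']
          simp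

-- B's fold over the reversed zip: running trips = suffix weight sum, answer = pvWt of weights
theorem pv_fold_reverse (cap : Int) (zs : List (Int × Int)) (t0 a0 : Int) :
    zs.reverse.foldl
      (fun (st : Int × Int) dp =>
        let trips := st.1 + (if dp.1 + dp.2 > cap then 2 else 1)
        (trips, st.2 + trips)) (t0, a0)
    = (t0 + (zs.map (fun dp => if dp.1 + dp.2 > cap then (2 : Int) else 1)).sum,
       a0 + (zs.length : Int) * t0 + pvWt (zs.map (fun dp => if dp.1 + dp.2 > cap then (2 : Int) else 1))) := by
  rw [List.foldl_reverse]
  induction zs generalizing t0 a0 with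
  | nil => simp [pvWt]
  | cons z t ih =>
      simp only [List.foldr_cons, ih, List.map_cons, List.sum_cons, pvWt, List.length_cons,
        Prod.mk.injEq]
      push_cast
      constructor <;> ring

-- the weighted position sum as a sum over pyRange, by reverse induction on the list
theorem pv_sum_pyRange (W : List Int) :
    ((PySem.List.pyRange 0 (W.length : Int) 1).map
      (fun i => (i + 1) * PySem.List.pyGetD W i 0)).sum = pvWt W := by
  induction W using List.reverseRecOn with
  | nil => simp [PySem.List.pyRange_one_eq_nil, pvWt]
  | append_singleton ys w ih =>
      have hlen : (ys ++ [w]).length = ys.length + 1 := by simp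
      rw [hlen]
      have hsplit : PySem.List.pyRange 0 ((ys.length + 1 : Nat) : Int) 1
          = PySem.List.pyRange 0 (ys.length : Int) 1 ++ [(ys.length : Int)] := by
        push_cast
        simpa using PySem.List.pyRange_one_succ_right (a := 0) (b := (ys.length : Int)) (by positivity)
      rw [hsplit, List.map_append, List.sum_append, pvWt_snoc]
      have h1 : (PySem.List.pyRange 0 (ys.length : Int) 1).map
          (fun i => (i + 1) * PySem.List.pyGetD (ys ++ [w]) i 0)
          = (PySem.List.pyRange 0 (ys.length : Int) 1).map
          (fun i => (i + 1) * PySem.List.pyGetD ys i 0) := by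
        apply List.map_congr_left
        intro i hi
        have hb := (PySem.List.mem_pyRange_one).mp hi
        have h0 : (0:Int) ≤ i := hb.1
        have hlt : i < (ys.length : Int) := hb.2
        rw [PySem.List.pyGetD_eq_getElem (ys ++ [w]) 0 h0 (by simp; omega),
            PySem.List.pyGetD_eq_getElem ys 0 h0 (by omega)]
        rw [List.getElem_append_left (by omega)]
      rw [h1, ih]
      simp [PySem.List.pyGetD_natCast, List.getD]

theorem solution_spec : Claim_equal_solution := by
  intro cap n ds ps _ hpre
  obtain ⟨hd, hp⟩ := hpre
  unfold Spec_solution solution solution_alt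
  dsimp only
  by_cases hn : n ≤ 0
  · rw [PySem.List.pyRange_neg_one_eq_nil (by omega)]
    have hm : max n 0 = ((0:Nat) : Int) := by simp; omega
    rw [hm, PySem.List.slice_to_natCast, PySem.List.slice_to_natCast]
    simp
  · have hm : max n 0 = ((n.toNat : Nat) : Int) := by omega
    rw [hm, PySem.List.slice_to_natCast, PySem.List.slice_to_natCast]
    have hld : (ds.take n.toNat).length = n.toNat := by simp; omega
    have hlp : (ps.take n.toNat).length = n.toNat := by simp; omega
    rw [pv_zip_reverse _ _ (by rw [hld, hlp]), pv_fold_reverse]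
    set zs := (ds.take n.toNat).zip (ps.take n.toNat) with hzs
    set W := zs.map (fun dp => if dp.1 + dp.2 > cap then (2 : Int) else 1) with hW
    -- A's fold is the sum of contributions over the reversed range
    have hrev : PySem.List.pyRange (n - 1) (-1) (-1)
        = (PySem.List.pyRange 0 n 1).reverse := by
      simpa using PySem.List.pyRange_neg_one_eq_reverse (a := n - 1) (b := -1)
    rw [hrev]
    have hA : (PySem.List.pyRange 0 n 1).reverse.foldl
        (fun answer i =>
          let d := PySem.List.pyGetD ds i 0
          let p := PySem.List.pyGetD ps i 0
          if d + p > cap then answer + (i + 1) * 2 else answer + (i + 1)) 0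
        = 0 + ((PySem.List.pyRange 0 n 1).reverse.map (fun i =>
            if PySem.List.pyGetD ds i 0 + PySem.List.pyGetD ps i 0 > cap
            then (i + 1) * 2 else (i + 1))).sum := by
      rw [← PySem.List.foldl_add]
      apply PySem.List.foldl_congr_mem
      intro acc x _
      dsimp only
      split_ifs <;> ring
    rw [hA, List.map_reverse, List.sum_reverse, zero_add]
    -- A's per-house term is (i+1) · W[i]
    have hWlen : W.length = n.toNat := by
      rw [hW, List.length_map, hzs, List.length_zip, hld, hlp, min_self]
    have hterm : (PySem.List.pyRange 0 n 1).map (fun i =>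
        if PySem.List.pyGetD ds i 0 + PySem.List.pyGetD ps i 0 > cap
        then (i + 1) * 2 else (i + 1))
        = (PySem.List.pyRange 0 n 1).map (fun i => (i + 1) * PySem.List.pyGetD W i 0) := by
      apply List.map_congr_left
      intro i hi
      have hb := (PySem.List.mem_pyRange_one).mp hi
      have h0 : (0:Int) ≤ i := hb.1
      have hlt : i < n := hb.2
      have hiW : i.toNat < W.length := by omega
      have hiW' : i < (W.length : Int) := by omega
      rw [PySem.List.pyGetD_eq_getElem W 0 h0 hiW']
      have hgW : W[i.toNat] = if PySem.List.pyGetD ds i 0 + PySem.List.pyGetD ps i 0 > cap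
          then (2:Int) else 1 := by
        simp only [hW, hzs, List.getElem_map, List.getElem_zip, List.getElem_take]
        rw [PySem.List.pyGetD_eq_getElem ds 0 h0 (by omega), PySem.List.pyGetD_eq_getElem ps 0 h0 (by omega)]
      rw [hgW]
      split_ifs <;> ring
    rw [hterm]
    have hn' : ((W.length : Nat) : Int) = n := by omega
    rw [← hn', pv_sum_pyRange]
    ring
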